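-- pv_equiv track=rewrite | github.com/oleg121203/MVP | backend/app/customer_support.py | _determine_ticket_category
-- ===== SOURCE A (Python) =====
-- def _determine_ticket_category(description: str) -> str:
--     """
--     Determines the category of a support ticket based on its description.
--
--     Args:
--         description (str): The ticket description text.
--
--     Returns:
--         str: Determined category for the ticket.
--     """
--     desc_lower = description.lower()
--     if any(kw in desc_lower for kw in ["bug", "error", "crash", "not working", "issue", "problem", "failure"]):
--         return "technical_issue"
--     elif any(kw in desc_lower for kw in ["billing", "invoice", "payment", "charge", "refund", "cost", "price"]):
--         return "billing"
--     elif any(kw in desc_lower for kw in ["account", "login", "password", "access", "profile", "signup"]):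
--         return "account_management"
--     elif any(kw in desc_lower for kw in ["feature", "how to", "question", "help", "tutorial", "guide", "training"]):
--         return "product_question"
--     elif any(kw in desc_lower for kw in ["feedback", "suggestion", "improvement", "idea", "recommendation"]):
--         return "feedback"
--     else:
--         return "general_inquiry"
-- ===== SOURCE B (Python) =====
-- _CATEGORIES = ["technical_issue", "billing", "account_management",
--                "product_question", "feedback", "general_inquiry"]
--
-- _KEYWORD_PRIORITY = {
--     "bug": 0, "error": 0, "crash": 0, "not working": 0, "issue": 0, "problem": 0, "failure": 0,
--     "billing": 1, "invoice": 1, "payment": 1, "charge": 1, "refund": 1, "cost": 1, "price": 1,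
--     "account": 2, "login": 2, "password": 2, "access": 2, "profile": 2, "signup": 2,
--     "feature": 3, "how to": 3, "question": 3, "help": 3, "tutorial": 3, "guide": 3, "training": 3,
--     "feedback": 4, "suggestion": 4, "improvement": 4, "idea": 4, "recommendation": 4,
-- }
--
-- def _determine_ticket_category(description: str) -> str:
--     desc_lower = description.lower()
--     best = 5
--     for kw, prio in _KEYWORD_PRIORITY.items():
--         if prio < best and kw in desc_lower:
--             best = prio
--     return _CATEGORIES[best]
-- ===== Notes on version B (the rewrite author's own statement) =====
-- stated objective: alternative
-- what changed: The early-return if/elif chain of group tests becomes one exhaustive pass over a flat keyword-to-priority dict that keeps a best-priority accumulator (min over all matching keywords), followed by an array index into the category list.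
import Mathlib
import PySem

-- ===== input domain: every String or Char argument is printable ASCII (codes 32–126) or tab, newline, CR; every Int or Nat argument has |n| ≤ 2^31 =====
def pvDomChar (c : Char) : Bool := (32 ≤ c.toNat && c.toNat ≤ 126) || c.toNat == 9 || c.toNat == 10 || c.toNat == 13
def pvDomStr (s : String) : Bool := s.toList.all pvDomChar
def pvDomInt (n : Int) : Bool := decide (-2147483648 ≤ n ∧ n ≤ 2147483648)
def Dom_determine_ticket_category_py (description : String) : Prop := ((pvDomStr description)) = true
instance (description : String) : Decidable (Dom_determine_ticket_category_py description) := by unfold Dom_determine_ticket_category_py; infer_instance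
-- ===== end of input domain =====

-- B replaces the early-return if/elif chain by one exhaustive pass over a flat keyword->priority
-- dict keeping a best-priority (min) accumulator, then indexes the category list (objective: alternative).


-- ===== PORT A =====
-- Transliteration of A's if/elif chain of any(kw in desc_lower) tests.
def determine_ticket_category_py (description : String) : String :=
  let desc_lower := PySem.Str.lower description
  if ["bug", "error", "crash", "not working", "issue", "problem", "failure"].any (fun kw => PySem.Str.isIn kw desc_lower) then
    "technical_issue"
  else if ["billing", "invoice", "payment", "charge", "refund", "cost", "price"].any (fun kw => PySem.Str.isIn kw desc_lower) then
    "billing"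
  else if ["account", "login", "password", "access", "profile", "signup"].any (fun kw => PySem.Str.isIn kw desc_lower) then
    "account_management"
  else if ["feature", "how to", "question", "help", "tutorial", "guide", "training"].any (fun kw => PySem.Str.isIn kw desc_lower) then
    "product_question"
  else if ["feedback", "suggestion", "improvement", "idea", "recommendation"].any (fun kw => PySem.Str.isIn kw desc_lower) then
    "feedback"
  else
    "general_inquiry"

-- ===== PORT B =====
-- B's category array and flat keyword->priority dict (insertion order).
def pvCategories : List String :=
  ["technical_issue", "billing", "account_management", "product_question", "feedback", "general_inquiry"]

def pvKeywordPriority : List (String × Nat) :=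
  [("bug", 0), ("error", 0), ("crash", 0), ("not working", 0), ("issue", 0), ("problem", 0), ("failure", 0),
   ("billing", 1), ("invoice", 1), ("payment", 1), ("charge", 1), ("refund", 1), ("cost", 1), ("price", 1),
   ("account", 2), ("login", 2), ("password", 2), ("access", 2), ("profile", 2), ("signup", 2),
   ("feature", 3), ("how to", 3), ("question", 3), ("help", 3), ("tutorial", 3), ("guide", 3), ("training", 3),
   ("feedback", 4), ("suggestion", 4), ("improvement", 4), ("idea", 4), ("recommendation", 4)]

-- Single exhaustive pass keeping the minimal matching priority; indexing is exact since best ≤ 5 always.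
def determine_ticket_category_py_alt (description : String) : String :=
  let desc_lower := PySem.Str.lower description
  let best := pvKeywordPriority.foldl
    (fun best kp => if kp.2 < best && PySem.Str.isIn kp.1 desc_lower then kp.2 else best) 5
  pvCategories.getD best "general_inquiry"

-- ===== PRECONDITION & SPEC =====
def Spec_determine_ticket_category_py (description : String) (out : String) : Prop := out = determine_ticket_category_py_alt description
instance (description : String) (out : String) : Decidable (Spec_determine_ticket_category_py description out) := by unfold Spec_determine_ticket_category_py; infer_instance

-- ===== CLAIM =====
def Claim_equal_determine_ticket_category_py : Prop := ∀ (description : String), Dom_determine_ticket_category_py description → Spec_determine_ticket_category_py description (determine_ticket_category_py description)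

-- ===== LEMMAS AND PROOFS =====

-- Folding B's update over a constant-priority segment: the best drops to p exactly when p < b and some keyword matches.
theorem pv_fold_seg (m : String → Bool) (p b : Nat) (kws : List String) :
    (kws.map (fun k => (k, p))).foldl
      (fun best kp => if kp.2 < best && m kp.1 then kp.2 else best) b
    = if p < b ∧ kws.any m then p else b := by
  induction kws generalizing b with
  | nil => simp
  | cons k ks ih =>
    simp only [List.map_cons, List.foldl_cons, List.any_cons, ih]
    by_cases hk : m k = true
    · by_cases hp : p < b
      · simp [hk, hp]
      · simp [hk, hp]
    · by_cases hp : p < b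
      · simp [hk, hp]
      · simp [hk, hp]

theorem pv_table_split :
    pvKeywordPriority =
      (["bug", "error", "crash", "not working", "issue", "problem", "failure"].map (fun k => (k, 0)))
      ++ (["billing", "invoice", "payment", "charge", "refund", "cost", "price"].map (fun k => (k, 1)))
      ++ (["account", "login", "password", "access", "profile", "signup"].map (fun k => (k, 2)))
      ++ (["feature", "how to", "question", "help", "tutorial", "guide", "training"].map (fun k => (k, 3)))
      ++ (["feedback", "suggestion", "improvement", "idea", "recommendation"].map (fun k => (k, 4))) := by
  rfl

-- B's exhaustive min-priority pass equals A's first-match chain, for any membership test m.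
theorem pv_chain (m : String → Bool) :
    pvCategories.getD
      (pvKeywordPriority.foldl
        (fun best kp => if kp.2 < best && m kp.1 then kp.2 else best) 5) "general_inquiry"
    = (if ["bug", "error", "crash", "not working", "issue", "problem", "failure"].any m then "technical_issue"
       else if ["billing", "invoice", "payment", "charge", "refund", "cost", "price"].any m then "billing"
       else if ["account", "login", "password", "access", "profile", "signup"].any m then "account_management"
       else if ["feature", "how to", "question", "help", "tutorial", "guide", "training"].any m then "product_question"
       else if ["feedback", "suggestion", "improvement", "idea", "recommendation"].any m then "feedback"
       else "general_inquiry") := by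
  rw [pv_table_split]
  simp only [List.foldl_append, pv_fold_seg]
  by_cases h0 : (["bug", "error", "crash", "not working", "issue", "problem", "failure"].any m) = true <;>
  by_cases h1 : (["billing", "invoice", "payment", "charge", "refund", "cost", "price"].any m) = true <;>
  by_cases h2 : (["account", "login", "password", "access", "profile", "signup"].any m) = true <;>
  by_cases h3 : (["feature", "how to", "question", "help", "tutorial", "guide", "training"].any m) = true <;>
  by_cases h4 : (["feedback", "suggestion", "improvement", "idea", "recommendation"].any m) = true <;>
  simp [h0, h1, h2, h3, h4, pvCategories]

-- ===== VERDICT =====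
theorem determine_ticket_category_py_spec : Claim_equal_determine_ticket_category_py := by
  intro description _
  unfold Spec_determine_ticket_category_py determine_ticket_category_py determine_ticket_category_py_alt
  exact (pv_chain (fun kw => PySem.Str.isIn kw (PySem.Str.lower description))).symm
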